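-- pv_equiv track=rewrite | github.com/Saurav13kr/GFG-Problems | Difficulty: Medium/Count Unique Vowel Strings/count-unique-vowel-strings.py | vowelCount
-- ===== SOURCE A (Python) =====
-- def vowelCount(s):
--     dict={}
--
--     for i in s:
--         if i in 'aeiou':
--             if i in dict:
--                 dict[i]+=1
--             else:
--                 dict[i]=1
--
--     if len(dict)==0:
--         return 0
--     total=1
--     n=len(dict)
--     for i in dict:
--         total*=(n*dict[i])
--         n-=1
--     return total
-- ===== SOURCE B (Python) =====
-- def vowelCount(s):
--     total = 1
--     k = 0
--     for v in 'aeiou':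
--         c = sum(ch == v for ch in s)
--         if c:
--             k += 1
--             total *= k * c
--     return total if k else 0
-- ===== Notes on version B (the rewrite author's own statement) =====
-- stated objective: simpler
-- what changed: Instead of building an insertion-ordered dict in one pass over s and multiplying with a descending multiplier n over its entries, B iterates over the five fixed vowels, counts each directly in s, and multiplies with an ascending multiplier k; no dict is kept at all (the product n*count over the dict equals k!*prod(counts), which is order-independent).
import Mathlib
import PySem

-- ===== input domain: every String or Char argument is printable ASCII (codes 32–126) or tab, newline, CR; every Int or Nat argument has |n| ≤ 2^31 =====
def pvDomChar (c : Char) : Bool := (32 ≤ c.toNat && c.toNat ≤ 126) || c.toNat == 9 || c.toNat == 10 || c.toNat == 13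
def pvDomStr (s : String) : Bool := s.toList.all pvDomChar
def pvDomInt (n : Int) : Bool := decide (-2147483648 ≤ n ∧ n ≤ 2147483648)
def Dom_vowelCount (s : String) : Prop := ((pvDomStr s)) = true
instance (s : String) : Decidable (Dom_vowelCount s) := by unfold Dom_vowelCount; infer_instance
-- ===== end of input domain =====

-- B drops A's insertion-ordered dict and descending multiplier: it counts each of the
-- five vowels directly and multiplies with an ascending multiplier — simpler, same O(n).

-- ===== PORT A =====
def vowelCount (s : String) : Int :=
  let d := s.toList.foldl
    (fun (d : PySem.Dict Char Int) i =>
      if PySem.Str.isIn (String.ofList [i]) "aeiou" then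
        if d.contains i then d.insert i (d.getD i 0 + 1)
        else d.insert i 1
      else d)
    PySem.Dict.empty
  if d.size = 0 then 0
  else
    (d.keys.foldl (fun (p : Int × Int) i => (p.1 * (p.2 * d.getD i 0), p.2 - 1))
      (1, (d.size : Int))).1

-- ===== PORT B =====
def vowelCount_alt (s : String) : Int :=
  let r := "aeiou".toList.foldl
    (fun (p : Int × Int) v =>
      let c : Int := (s.toList.map (fun ch => if ch == v then (1 : Int) else 0)).sum
      if c ≠ 0 then (p.1 * ((p.2 + 1) * c), p.2 + 1) else p)
    (1, 0)
  if r.2 ≠ 0 then r.1 else 0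

-- ===== PRECONDITION & SPEC =====
def Spec_vowelCount (s : String) (out : Int) : Prop := out = vowelCount_alt s
instance (s : String) (out : Int) : Decidable (Spec_vowelCount s out) := by unfold Spec_vowelCount; infer_instance

-- ===== CLAIM (what is proved, stated in full; the proofs are below) =====
def Claim_equal_vowelCount : Prop := ∀ (s : String), Dom_vowelCount s → Spec_vowelCount s (vowelCount s)

-- ===== LEMMAS AND PROOFS =====

lemma singleton_infix_iff {α : Type} (a : α) (l : List α) : [a] <:+: l ↔ a ∈ l := by
  constructor
  · intro h; exact h.subset (List.mem_singleton_self a)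
  · intro h
    obtain ⟨u, v, rfl⟩ := List.append_of_mem h
    exact ⟨u, v, by simp⟩

lemma vowel_test (i : Char) :
    PySem.Str.isIn (String.ofList [i]) "aeiou" = true ↔ i ∈ "aeiou".toList := by
  rw [PySem.Str.isIn_iff_infix]
  simpa using singleton_infix_iff i "aeiou".toList

-- the descending-n multiply loop of A computes len! * prod
lemma descFold (cs : List Int) : ∀ t : Int,
    cs.foldl (fun (p : Int × Int) c => (p.1 * (p.2 * c), p.2 - 1)) (t, (cs.length : Int))
      = (t * (Nat.factorial cs.length : Int) * cs.prod, 0) := by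
  induction cs with
  | nil => intro t; simp
  | cons c cs ih =>
    intro t
    rw [List.foldl_cons,
      show ((c :: cs).length : Int) - 1 = (cs.length : Int) by push_cast [List.length_cons]; ring, ih]
    simp only [List.prod_cons, List.length_cons, Nat.factorial_succ, Prod.mk.injEq]
    refine ⟨?_, trivial⟩
    push_cast
    ring

-- the ascending-k multiply loop of B
lemma ascFold (cs : List Int) : ∀ (t : Int) (k : Nat),
    cs.foldl (fun (p : Int × Int) c => (p.1 * ((p.2 + 1) * c), p.2 + 1)) (t, (k : Int))
      = (t * (((List.range cs.length).map (fun j => ((k + 1 + j : Nat) : Int))).prod) * cs.prod,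
         ((k + cs.length : Nat) : Int)) := by
  induction cs with
  | nil => intro t k; simp
  | cons c cs ih =>
    intro t k
    have hk : ((k : Int) + 1) = ((k + 1 : Nat) : Int) := by push_cast; ring
    simp only [List.foldl_cons, hk]
    rw [ih]
    have hshift : ((List.range (c :: cs).length).map (fun j => ((k + 1 + j : Nat) : Int))).prod
        = ((k + 1 : Nat) : Int) * ((List.range cs.length).map (fun j => ((k + 1 + 1 + j : Nat) : Int))).prod := by
      rw [List.length_cons, List.range_succ_eq_map, List.map_cons, List.map_map, List.prod_cons]
      congr 2
      refine List.map_congr_left ?_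
      intro j _
      simp only [Function.comp]
      congr 1
      omega
    rw [hshift]
    simp only [List.prod_cons, Prod.mk.injEq]
    refine ⟨by push_cast; ring, by push_cast [List.length_cons]; ring⟩

lemma rangeFact (m : Nat) :
    ((List.range m).map (fun j => ((0 + 1 + j : Nat) : Int))).prod = (Nat.factorial m : Int) := by
  induction m with
  | zero => simp [Nat.factorial]
  | succ m ih =>
    rw [List.range_succ, List.map_append, List.prod_append, ih]
    simp only [List.map_cons, List.map_nil, List.prod_cons, List.prod_nil, Nat.factorial_succ]
    push_cast
    ring

lemma main_eq (s : String) : vowelCount s = vowelCount_alt s := by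
  have haeiou : ("aeiou".toList) = ['a','e','i','o','u'] := by decide
  -- abbreviations
  set l := s.toList with hl
  have hd : (l.foldl
      (fun (d : PySem.Dict Char Int) i =>
        if PySem.Str.isIn (String.ofList [i]) "aeiou" then
          if d.contains i then d.insert i (d.getD i 0 + 1)
          else d.insert i 1
        else d)
      PySem.Dict.empty)
      = PySem.Dict.counter (l.filter (fun i => PySem.Str.isIn (String.ofList [i]) "aeiou")) := by
    rw [PySem.List.foldl_if_eq_foldl_filter]
    rw [PySem.List.foldl_congr_mem _ _ (fun (d : PySem.Dict Char Int) i => d.insert i (d.getD i 0 + 1)) _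
      (by intro acc x _
          by_cases hc : acc.contains x = true
          · simp [hc]
          · simp only [Bool.not_eq_true] at hc
            simp [hc, PySem.Dict.getD_of_not_contains acc 0 hc])]
    exact PySem.Dict.foldl_insert_getD_add_one_eq_counter _
  set vs := l.filter (fun i => PySem.Str.isIn (String.ofList [i]) "aeiou") with hvs
  set L := PySem.Set.ofList vs with hLdef
  set P := (['a','e','i','o','u'] : List Char).filter (fun v => decide (((l.count v : Int)) ≠ 0)) with hPdef
  set cnt : Char → Int := fun v => (l.count v : Int) with hcnt
  -- membership / nodup / perm
  have hLn : L.Nodup := PySem.Set.nodup_ofList vs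
  have hPn : P.Nodup := List.Nodup.filter _ (by decide)
  have hperm : L.Perm P := by
    rw [List.perm_ext_iff_of_nodup hLn hPn]
    intro a
    have h1 : a ∈ L ↔ a ∈ l ∧ a ∈ (['a','e','i','o','u'] : List Char) := by
      rw [hLdef, PySem.Set.mem_ofList, hvs, List.mem_filter]
      rw [vowel_test, haeiou]
    have h2 : a ∈ P ↔ a ∈ (['a','e','i','o','u'] : List Char) ∧ a ∈ l := by
      rw [hPdef, List.mem_filter]
      simp only [decide_eq_true_eq, ne_eq, Int.natCast_eq_zero, List.count_eq_zero]
      tauto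
    rw [h1, h2]; tauto
  have hpm : (L.map cnt).Perm (P.map cnt) := hperm.map cnt
  have hlen : (L.map cnt).length = (P.map cnt).length := hpm.length_eq
  have hprod : (L.map cnt).prod = (P.map cnt).prod := hpm.prod_eq
  -- A side
  have hA : vowelCount s = (if L.length = 0 then 0
      else 1 * (Nat.factorial (L.map cnt).length : Int) * (L.map cnt).prod) := by
    simp only [vowelCount]
    rw [← hl, hd]
    have hkeys : (PySem.Dict.counter vs).keys = L := PySem.Dict.keys_counter vs
    have hsize : (PySem.Dict.counter vs).size = L.length := by
      have : (PySem.Dict.counter vs).size = (PySem.Dict.counter vs).keys.length := by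
        simp [PySem.Dict.size, PySem.Dict.keys]
      rw [this, hkeys]
    rw [hkeys, hsize]
    by_cases h0 : L.length = 0
    · simp [h0]
    · simp only [h0, if_false]
      have hstep : L.foldl (fun (p : Int × Int) i => (p.1 * (p.2 * (PySem.Dict.counter vs).getD i 0), p.2 - 1)) (1, (L.length : Int))
          = L.foldl (fun (p : Int × Int) i => (p.1 * (p.2 * cnt i), p.2 - 1)) (1, (L.length : Int)) := by
        refine PySem.List.foldl_congr_mem _ _ _ _ ?_
        intro acc x hx
        have hxv : x ∈ vs := (PySem.Set.mem_ofList vs x).mp hx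
        have hpax : (fun i => PySem.Str.isIn (String.ofList [i]) "aeiou") x = true :=
          (List.mem_filter.mp hxv).2
        have hcf : List.count x (List.filter (fun i => PySem.Str.isIn (String.ofList [i]) "aeiou") l) = List.count x l :=
          List.count_filter hpax
        rw [PySem.Dict.getD_counter, hvs, hcf]
      rw [hstep]
      have hfm : L.foldl (fun (p : Int × Int) i => (p.1 * (p.2 * cnt i), p.2 - 1)) (1, (L.length : Int))
          = (L.map cnt).foldl (fun (p : Int × Int) c => (p.1 * (p.2 * c), p.2 - 1)) (1, ((L.map cnt).length : Int)) := by
        rw [List.foldl_map, List.length_map]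
      rw [hfm, descFold]
  -- B side
  have hB : vowelCount_alt s = (if (P.map cnt).length = 0 then 0
      else 1 * (Nat.factorial (P.map cnt).length : Int) * (P.map cnt).prod) := by
    simp only [vowelCount_alt]
    rw [← hl, haeiou]
    have hsum : ∀ v : Char, (l.map (fun ch => if ch == v then (1 : Int) else 0)).sum = cnt v := by
      intro v
      rw [PySem.List.sum_map_ite_one_zero]
      simp [hcnt, List.count]
    simp only [hsum]
    rw [PySem.List.foldl_ite_eq_foldl_filter (p := fun v => cnt v ≠ 0)
      (f := fun (p : Int × Int) v => (p.1 * ((p.2 + 1) * cnt v), p.2 + 1))]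
    rw [← hPdef]
    have hfm : P.foldl (fun (p : Int × Int) v => (p.1 * ((p.2 + 1) * cnt v), p.2 + 1)) (1, 0)
        = (P.map cnt).foldl (fun (p : Int × Int) c => (p.1 * ((p.2 + 1) * c), p.2 + 1)) (1, ((0 : Nat) : Int)) := by
      rw [List.foldl_map]; norm_num
    rw [hfm, ascFold, rangeFact]
    simp only [Nat.zero_add]
    split_ifs with h1 h2 <;> first | rfl | omega
  rw [hA, hB, hlen, hprod]
  have hLl : L.length = (P.map cnt).length := by rw [← hlen, List.length_map]
  rw [hLl]

-- ===== VERDICT (by name: the statement is the Claim_ definition above) =====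
theorem vowelCount_spec : Claim_equal_vowelCount := by
  intro s _
  unfold Spec_vowelCount
  exact main_eq s
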